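-- pv_equiv track=rewrite | github.com/glenstewart3/WellTrack | backend/tests/test_photo_match.py | _tokens
-- ===== SOURCE A (Python) =====
-- import unicodedata
--
-- def _tokens(s):
--     if not s:
--         return []
--     s = unicodedata.normalize("NFKD", str(s))
--     s = "".join(c for c in s if not unicodedata.combining(c))
--     buf, out = [], []
--     for c in s:
--         if c.isalnum():
--             buf.append(c.lower())
--         elif buf:
--             out.append("".join(buf))
--             buf = []
--     if buf:
--         out.append("".join(buf))
--     return out
-- ===== SOURCE B (Python) =====
-- import unicodedata
--
-- def _tokens(s):
--     if not s:
--         return []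
--     s = unicodedata.normalize("NFKD", str(s))
--     s = "".join(c for c in s if not unicodedata.combining(c))
--     return "".join(c.lower() if c.isalnum() else " " for c in s).split()
-- ===== Notes on version B (the rewrite author's own statement) =====
-- stated objective: simpler
-- what changed: Instead of accumulating a buffer and flushing on alnum/non-alnum boundaries, B maps the string once (alnum chars lowered, everything else replaced by a space) and lets str.split() do all the run detection and token extraction.
import Mathlib
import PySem

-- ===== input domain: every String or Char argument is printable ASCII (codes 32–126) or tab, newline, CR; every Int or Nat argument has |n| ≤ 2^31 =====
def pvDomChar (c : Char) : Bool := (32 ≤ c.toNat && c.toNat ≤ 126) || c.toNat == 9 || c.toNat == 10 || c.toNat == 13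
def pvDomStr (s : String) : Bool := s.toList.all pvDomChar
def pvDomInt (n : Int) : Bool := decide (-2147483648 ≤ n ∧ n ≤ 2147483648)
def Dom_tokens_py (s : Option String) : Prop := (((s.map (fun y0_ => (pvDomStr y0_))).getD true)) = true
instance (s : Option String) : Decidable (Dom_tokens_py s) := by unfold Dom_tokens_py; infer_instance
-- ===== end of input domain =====

-- B replaces A's buffer/flush accumulator loop by a staged pipeline: map the string once
-- (alnum chars lowered, all other chars turned into a space) and let str.split() do the
-- run detection and token extraction; objective: simpler, same cost.
-- On the printable-ASCII domain, unicodedata.normalize("NFKD", s) is the identity and no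
-- character is combining, so both ports render those two lines as the identity (exact on Dom).

-- ===== PORT A =====
-- the for-loop of A, state = (buf, out), branches in A's order
def tokensGoA : List Char → List Char → List String → List String
  | [], buf, out => if buf = [] then out else out ++ [String.ofList buf]
  | c :: cs, buf, out =>
    if PySem.Chars.isalnum c then
      tokensGoA cs (buf ++ [PySem.Chars.lowerChar c]) out
    else if buf = [] then
      tokensGoA cs buf out
    else
      tokensGoA cs [] (out ++ [String.ofList buf])

def tokens_py (s : Option String) : List String :=
  match s with
  | none => []
  | some t => if t = "" then [] else tokensGoA t.toList [] []

-- ===== PORT B =====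
-- the per-character map of B's comprehension: c.lower() if c.isalnum() else " "
def tokensMapChar (c : Char) : Char :=
  if PySem.Chars.isalnum c then PySem.Chars.lowerChar c else ' '

def tokens_py_alt (s : Option String) : List String :=
  match s with
  | none => []
  | some t =>
    if t = "" then []
    else PySem.Str.split₀ (String.ofList (t.toList.map tokensMapChar))

-- ===== PRECONDITION & SPEC =====
def Spec_tokens_py (s : Option String) (out : List String) : Prop := out = tokens_py_alt s
instance (s : Option String) (out : List String) : Decidable (Spec_tokens_py s out) := by unfold Spec_tokens_py; infer_instance

-- ===== CLAIM (what is proved, stated in full; the proofs are below) =====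
def Claim_equal_tokens_py : Prop := ∀ (s : Option String), Dom_tokens_py s → Spec_tokens_py s (tokens_py s)

-- ===== LEMMAS AND PROOFS =====

theorem pvValToNat (c : Char) : c.val.toNat = c.toNat := rfl

theorem pvAlnumRange (c : Char) (h : PySem.Chars.isalnum c = true) :
    (65 ≤ c.toNat ∧ c.toNat ≤ 90) ∨ (97 ≤ c.toNat ∧ c.toNat ≤ 122) ∨ (48 ≤ c.toNat ∧ c.toNat ≤ 57) := by
  simp only [PySem.Chars.isalnum, PySem.Chars.isalpha, PySem.Chars.isdigit,
    PySem.Chars.isupper, PySem.Chars.islower, Bool.or_eq_true, Bool.and_eq_true,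
    decide_eq_true_eq, Char.le_def, UInt32.le_iff_toNat_le, pvValToNat,
    show 'A'.val.toNat = 65 from rfl, show 'Z'.val.toNat = 90 from rfl,
    show 'a'.val.toNat = 97 from rfl, show 'z'.val.toNat = 122 from rfl,
    show '0'.val.toNat = 48 from rfl, show '9'.val.toNat = 57 from rfl] at h
  tauto

theorem pvUpperIff (c : Char) : PySem.Chars.isupper c = true ↔ (65 ≤ c.toNat ∧ c.toNat ≤ 90) := by
  simp only [PySem.Chars.isupper, Bool.and_eq_true, decide_eq_true_eq, Char.le_def,
    UInt32.le_iff_toNat_le, pvValToNat,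
    show 'A'.val.toNat = 65 from rfl, show 'Z'.val.toNat = 90 from rfl]

theorem pvSpaceIff (c : Char) : PySem.Chars.isspace c = false ↔ ¬(c.toNat = 32 ∨ (9 ≤ c.toNat ∧ c.toNat ≤ 13) ∨ (28 ≤ c.toNat ∧ c.toNat ≤ 31) ∨ c.toNat = 133 ∨ c.toNat = 160 ∨ c.toNat = 5760 ∨ (8192 ≤ c.toNat ∧ c.toNat ≤ 8202) ∨ c.toNat = 8232 ∨ c.toNat = 8233 ∨ c.toNat = 8239 ∨ c.toNat = 8287 ∨ c.toNat = 12288) := by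
  simp only [PySem.Chars.isspace, Bool.or_eq_false_iff, Bool.and_eq_false_iff,
    decide_eq_false_iff_not]
  push Not
  omega

-- an alnum char, once lowered, is never whitespace
theorem pvNotSpace {c : Char} (h : PySem.Chars.isalnum c = true) :
    PySem.Chars.isspace (PySem.Chars.lowerChar c) = false := by
  have hr := pvAlnumRange c h
  unfold PySem.Chars.lowerChar
  by_cases hu : PySem.Chars.isupper c = true
  · have h65 := (pvUpperIff c).mp hu
    have ht : (Char.ofNat (c.toNat + 32)).toNat = c.toNat + 32 := by
      rw [Char.toNat_ofNat, if_pos (Or.inl (by omega))]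
    rw [if_pos hu, pvSpaceIff, ht]
    omega
  · rw [if_neg hu, pvSpaceIff]
    rw [pvUpperIff] at hu
    omega

theorem pvSpaceChar : PySem.Chars.isspace ' ' = true := by decide

-- single-step unfoldings of split₀.go (definitional)
theorem pvGoNil (cur : List Char) (acc : List (List Char)) :
    PySem.Chars.split₀.go [] cur acc =
      if cur.isEmpty then acc.reverse else (cur.reverse :: acc).reverse := rfl

theorem pvGoCons (c : Char) (cs cur : List Char) (acc : List (List Char)) :
    PySem.Chars.split₀.go (c :: cs) cur acc =
      if PySem.Chars.isspace c then
        (if cur.isEmpty then PySem.Chars.split₀.go cs [] acc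
         else PySem.Chars.split₀.go cs [] (cur.reverse :: acc))
      else PySem.Chars.split₀.go cs (c :: cur) acc := rfl

-- split₀.go emits acc (reversed) as a prefix of its result
theorem pvGoAcc (l : List Char) : ∀ cur acc,
    PySem.Chars.split₀.go l cur acc = acc.reverse ++ PySem.Chars.split₀.go l cur [] := by
  induction l with
  | nil =>
    intro cur acc
    by_cases h : cur.isEmpty <;> simp [pvGoNil, h]
  | cons c cs ih =>
    intro cur acc
    by_cases hs : PySem.Chars.isspace c
    · by_cases hc : cur.isEmpty
      · simp only [pvGoCons, hs, if_true, hc]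
        exact ih [] acc
      · simp only [pvGoCons, hs, if_true, hc]
        rw [ih [] (cur.reverse :: acc), ih [] [cur.reverse]]
        simp
    · simp only [pvGoCons, hs]
      exact ih (c :: cur) acc

-- the main invariant: A's loop equals split₀.go over the mapped string
theorem pvMain (cs : List Char) : ∀ buf out,
    tokensGoA cs buf out =
      out ++ (PySem.Chars.split₀.go (cs.map tokensMapChar) buf.reverse []).map String.ofList := by
  induction cs with
  | nil =>
    intro buf out
    rcases buf with _ | ⟨b, bs⟩
    · simp [tokensGoA, pvGoNil]
    · have hne : ((b :: bs).reverse).isEmpty = false := by simp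
      simp [tokensGoA, pvGoNil]
  | cons c cs ih =>
    intro buf out
    cases hk : PySem.Chars.isalnum c
    · -- non-alnum: mapped to ' ', the split flushes
      have hmc : tokensMapChar c = ' ' := by simp [tokensMapChar, hk]
      rcases hbuf : buf with _ | ⟨b, bs⟩
      · simp only [tokensGoA, hk, Bool.false_eq_true, if_false, ih,
          List.map_cons, hmc, pvGoCons, pvSpaceChar, if_true, List.reverse_nil,
          List.isEmpty_nil]
      · have hne : ((b :: bs).reverse).isEmpty = false := by simp
        simp only [tokensGoA, hk, Bool.false_eq_true, if_false, reduceCtorEq, ih,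
          List.map_cons, hmc, pvGoCons, pvSpaceChar, if_true, hne]
        rw [pvGoAcc _ [] [(b :: bs).reverse.reverse]]
        simp
    · -- alnum: mapped to lowerChar c, the split keeps accumulating
      have hmc : tokensMapChar c = PySem.Chars.lowerChar c := by simp [tokensMapChar, hk]
      simp only [tokensGoA, hk, if_true, ih, List.map_cons, hmc, pvGoCons,
        pvNotSpace hk, Bool.false_eq_true, if_false, List.reverse_append,
        List.reverse_cons, List.reverse_nil, List.nil_append, List.singleton_append]

-- ===== VERDICT (by name: the statement is the Claim_ definition above) =====
theorem tokens_py_spec : Claim_equal_tokens_py := by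
  intro s _
  unfold Spec_tokens_py tokens_py tokens_py_alt
  rcases s with _ | t
  · rfl
  · by_cases ht : t = ""
    · simp [ht]
    · simp only [ht, if_false]
      rw [pvMain t.toList [] [], PySem.Str.split₀]
      simp [PySem.Chars.split₀]
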